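-- pv_equiv track=rewrite | github.com/captainGeech42/ctf-writeups | pbctf2020/queensarah2/p_square_root.py | all_pairings_offsets
-- ===== SOURCE A (Python) =====
-- def all_pairings_offsets(l, n_offsets):
--     assert(len(l) % 2 == 0)
--
--     if len(l) == 0:
--         return [[]]
--
--     out = []
--     for i in range(1, len(l)):
--         for rest in all_pairings_offsets(l[1:i] + l[i+1:], n_offsets):
--             for offset in range(n_offsets):
--                 out.append([(l[0], l[i], offset)] + rest)
--     return out
-- ===== SOURCE B (Python) =====
-- def _pairings(l):
--     if not l:
--         return [[]]
--     return [[(l[0], l[i])] + rest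
--             for i in range(1, len(l))
--             for rest in _pairings(l[1:i] + l[i+1:])]
--
-- def _offset_vectors(n, k):
--     # offset vectors of length k, ordered so the first coordinate varies fastest
--     if k == 0:
--         return [[]]
--     return [[o] + v for v in _offset_vectors(n, k - 1) for o in range(n)]
--
-- def all_pairings_offsets(l, n_offsets):
--     assert(len(l) % 2 == 0)
--     result = []
--     for p in _pairings(l):
--         for v in _offset_vectors(n_offsets, len(p)):
--             result.append([(x, y, o) for (x, y), o in zip(p, v)])
--     return result
-- ===== Notes on version B (the rewrite author's own statement) =====
-- stated objective: alternative
-- what changed: A enumerates pairings and offsets in one interleaved recursion (three nested loops per level); B splits the task into two phases: a recursion producing bare pairings, a separate recursion producing offset vectors (first coordinate fastest), and a final zip of each pairing with each vector.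
import Mathlib
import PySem

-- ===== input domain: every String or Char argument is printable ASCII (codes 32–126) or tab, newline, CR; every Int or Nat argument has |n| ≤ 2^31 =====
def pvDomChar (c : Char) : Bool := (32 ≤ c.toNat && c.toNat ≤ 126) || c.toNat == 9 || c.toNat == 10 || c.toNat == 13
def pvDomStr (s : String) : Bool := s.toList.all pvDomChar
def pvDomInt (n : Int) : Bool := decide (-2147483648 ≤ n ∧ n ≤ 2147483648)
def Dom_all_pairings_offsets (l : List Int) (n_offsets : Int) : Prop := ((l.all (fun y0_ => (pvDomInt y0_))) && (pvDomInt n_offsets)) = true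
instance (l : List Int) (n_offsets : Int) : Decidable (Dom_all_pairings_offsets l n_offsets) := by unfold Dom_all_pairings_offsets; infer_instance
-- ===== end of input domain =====

-- B re-implements A in two separate phases (bare pairings first, then offset vectors applied to each),
-- instead of A's single recursion interleaving pairing choice and offsets; same cost, different decomposition.

-- length of the sublist l[1:i] + l[i+1:] (used by both ports' decreasing_by)
theorem pvSubLen (l : List Int) (i : Int) (h1 : 1 ≤ i) (h2 : i < (l.length : Int)) :
    (PySem.List.slice l (some 1) (some i) ++ PySem.List.slice l (some (i + 1)) none).length + 2 = l.length := by
  have e1 : PySem.List.slice l (some 1) (some i) = (l.drop (1 : Int).toNat).take (i.toNat - (1 : Int).toNat) := by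
    rw [PySem.List.slice_toNat l (by omega) (by omega)]
  have e2 : PySem.List.slice l (some (i + 1)) none = l.drop (i + 1).toNat :=
    PySem.List.slice_from l (by omega)
  have hi : i.toNat < l.length := by omega
  have hi1 : (i + 1).toNat = i.toNat + 1 := by omega
  simp [e1, e2, hi1, List.length_append, List.length_take, List.length_drop]
  omega

-- ===== PORT A =====
-- transliteration of A: recursion over the list, three nested append-loops;
-- l[0] and l[i] ported as pyGetD with default 0 (both indices are in range: l is nonempty and 1 ≤ i < len(l))
def all_pairings_offsets (l : List Int) (n_offsets : Int) : List (List (Int × Int × Int)) :=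
  if l.length = 0 then [[]]
  else
    (PySem.List.pyRange 1 (PySem.List.len l) 1).attach.foldl
      (fun out x =>
        (all_pairings_offsets (PySem.List.slice l (some 1) (some x.1) ++ PySem.List.slice l (some (x.1 + 1)) none) n_offsets).foldl
          (fun out2 rest =>
            (PySem.List.pyRange 0 n_offsets 1).foldl
              (fun out3 offset => out3 ++ [(PySem.List.pyGetD l 0 0, PySem.List.pyGetD l x.1 0, offset) :: rest])
              out2)
          out)
      []
termination_by l.length
decreasing_by
  have hm := (PySem.List.mem_pyRange_one.mp (by simpa [PySem.List.len_eq] using x.2))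
  have := pvSubLen l x.1 hm.1 (by simpa [PySem.List.len_eq] using hm.2)
  omega

-- ===== PORT B =====
-- phase 1: all perfect pairings of l (no offsets), same recursion scheme as the Python helper _pairings
def pvPairings (l : List Int) : List (List (Int × Int)) :=
  if l.length = 0 then [[]]
  else
    (PySem.List.pyRange 1 (PySem.List.len l) 1).attach.flatMap
      (fun x =>
        (pvPairings (PySem.List.slice l (some 1) (some x.1) ++ PySem.List.slice l (some (x.1 + 1)) none)).map
          (fun rest => (PySem.List.pyGetD l 0 0, PySem.List.pyGetD l x.1 0) :: rest))
termination_by l.length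
decreasing_by
  have hm := (PySem.List.mem_pyRange_one.mp (by simpa [PySem.List.len_eq] using x.2))
  have := pvSubLen l x.1 hm.1 (by simpa [PySem.List.len_eq] using hm.2)
  omega

-- phase 2: offset vectors of length k, first coordinate varying fastest (_offset_vectors)
def pvOffsetVectors (n : Int) (k : Nat) : List (List Int) :=
  match k with
  | 0 => [[]]
  | k' + 1 => (pvOffsetVectors n k').flatMap (fun v => (PySem.List.pyRange 0 n 1).map (fun o => o :: v))

def all_pairings_offsets_alt (l : List Int) (n_offsets : Int) : List (List (Int × Int × Int)) :=
  (pvPairings l).flatMap (fun p =>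
    (pvOffsetVectors n_offsets p.length).map (fun v =>
      (p.zip v).map (fun xyo => (xyo.1.1, xyo.1.2, xyo.2))))

-- ===== PRECONDITION & SPEC =====
-- Pre_ excludes odd-length lists, on which the Python A raises AssertionError (B asserts identically).
def Pre_all_pairings_offsets (l : List Int) (n_offsets : Int) : Prop := l.length % 2 = 0
instance (l : List Int) (n_offsets : Int) : Decidable (Pre_all_pairings_offsets l n_offsets) := by unfold Pre_all_pairings_offsets; infer_instance
def pvWitness_all_pairings_offsets : List Int × Int := ([1, 2, 3, 4], 2)

def Spec_all_pairings_offsets (l : List Int) (n_offsets : Int) (out : List (List (Int × Int × Int))) : Prop := out = all_pairings_offsets_alt l n_offsets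
instance (l : List Int) (n_offsets : Int) (out : List (List (Int × Int × Int))) : Decidable (Spec_all_pairings_offsets l n_offsets out) := by unfold Spec_all_pairings_offsets; infer_instance

-- ===== CLAIM (what is proved, stated in full; the proofs are below) =====
def Claim_equal_all_pairings_offsets : Prop := ∀ (l : List Int) (n_offsets : Int), Dom_all_pairings_offsets l n_offsets → Pre_all_pairings_offsets l n_offsets → Spec_all_pairings_offsets l n_offsets (all_pairings_offsets l n_offsets)

-- ===== LEMMAS AND PROOFS =====

-- flatten of a map to singletons is a map (no Mathlib/PySem lemma in this exact shape)
theorem pvFlattenSingleton {α β : Type} (f : α → β) (l : List α) :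
    (l.map (fun x => [f x])).flatten = l.map f := by
  induction l with
  | nil => simp
  | cons a l ih => simp [ih]

-- A unfolded to flatMap form on a nonempty list
theorem pvA_flatMap (l : List Int) (n : Int) (h : ¬ l.length = 0) :
    all_pairings_offsets l n =
      (PySem.List.pyRange 1 ((l.length : Int)) 1).flatMap
        (fun i =>
          (all_pairings_offsets (PySem.List.slice l (some 1) (some i) ++ PySem.List.slice l (some (i + 1)) none) n).flatMap
            (fun rest =>
              (PySem.List.pyRange 0 n 1).map
                (fun offset => (PySem.List.pyGetD l 0 0, PySem.List.pyGetD l i 0, offset) :: rest))) := by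
  rw [all_pairings_offsets]
  simp [h, List.flatMap_def, pvFlattenSingleton]

-- B unfolded to the same flatMap form on a nonempty list
theorem pvB_flatMap (l : List Int) (n : Int) (h : ¬ l.length = 0) :
    all_pairings_offsets_alt l n =
      (PySem.List.pyRange 1 ((l.length : Int)) 1).flatMap
        (fun i =>
          (all_pairings_offsets_alt (PySem.List.slice l (some 1) (some i) ++ PySem.List.slice l (some (i + 1)) none) n).flatMap
            (fun rest =>
              (PySem.List.pyRange 0 n 1).map
                (fun offset => (PySem.List.pyGetD l 0 0, PySem.List.pyGetD l i 0, offset) :: rest))) := by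
  conv_lhs => rw [all_pairings_offsets_alt, pvPairings]
  simp [h, all_pairings_offsets_alt, List.flatMap_def, Function.comp_def, pvOffsetVectors,
    List.map_map, List.zip_cons_cons]
  simp only [List.flatten_flatten, List.map_map, Function.comp_def]

theorem pvMain (l : List Int) (n : Int) : all_pairings_offsets l n = all_pairings_offsets_alt l n := by
  suffices H : ∀ (N : Nat) (l : List Int) (n : Int), l.length ≤ N → all_pairings_offsets l n = all_pairings_offsets_alt l n from
    H l.length l n le_rfl
  intro N
  induction N with
  | zero =>
    intro l n hl
    have h0 : l.length = 0 := by omega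
    rw [all_pairings_offsets, all_pairings_offsets_alt]
    simp [pvPairings, pvOffsetVectors, List.length_eq_zero_iff.mp h0]
  | succ N ih =>
    intro l n hl
    by_cases h : l.length = 0
    · rw [all_pairings_offsets, all_pairings_offsets_alt]
      simp [pvPairings, pvOffsetVectors, List.length_eq_zero_iff.mp h]
    · rw [pvA_flatMap l n h, pvB_flatMap l n h]
      apply List.flatMap_congr
      intro i hi
      have hm := PySem.List.mem_pyRange_one.mp hi
      have hsub := pvSubLen l i hm.1 hm.2
      rw [ih _ n (by omega)]

-- ===== VERDICT (by name: the statement is the Claim_ definition above) =====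
theorem all_pairings_offsets_spec : Claim_equal_all_pairings_offsets := by
  intro l n _ _
  exact pvMain l n
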